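-- pv_equiv track=rewrite | github.com/MrShoeShoe66/TopDownTraveler | src/main.py | levelselectrender
-- ===== SOURCE A (Python) =====
-- def levelselectrender(selected, max, page):
--     output = ''
--
--     topbot = ''
--     midpad = ''
--     mid = ''
--
--     for i1 in [1,2,3,4,5]:
--         i = i1 + 5 * page
--         if i <= max:
--
--             if i == selected:
--                 topbot = f'{topbot}# # # # #   '
--             else:
--                 topbot = f'{topbot}- - - - -   '
--
--             if i == selected:
--                 midpad = f'{midpad}#       #   '
--             else:
--                 midpad = f'{midpad}-       -   '
--
--             if i > 99:
--                 if i == selected: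
--                     mid = f'{mid}#  {i}  #   '
--                 else:
--                     mid = f'{mid}-  {i}  -   '
--             elif i > 9:
--                 if i == selected:
--                     mid = f'{mid}#   {i}  #   '
--                 else:
--                     mid = f'{mid}-   {i}  -   '
--             else:
--                 if i == selected:
--                     mid = f'{mid}#   {i}   #   '
--                 else:
--                     mid = f'{mid}-   {i}   -   '
--
--     output = f'{topbot}\n{midpad}\n{mid}\n{midpad}\n{topbot}'
--
--     return output
-- ===== SOURCE B (Python) =====
-- def levelselectrender(selected, max, page):
--     # Row-major rendering: the number of visible cells is computed in closed form
--     # (no per-cell visibility test), then each of the five output rows is built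
--     # whole from a row-kind code, with the middle row's gaps chosen by two
--     # independent conditions instead of a three-way nested branch.
--     count = min(5, max - 5 * page)
--     if count < 0:
--         count = 0
--     nums = list(range(5 * page + 1, 5 * page + 1 + count))
--     rows = []
--     for kind in (0, 1, 2, 1, 0):
--         segs = []
--         for i in nums:
--             m = '#' if i == selected else '-'
--             if kind == 0:
--                 segs.append((m + ' ') * 4 + m + '   ')
--             elif kind == 1:
--                 segs.append(m + ' ' * 7 + m + '   ')
--             else:
--                 left = '  ' if i > 99 else '   '
--                 right = '  ' if i > 9 else '   '
--                 segs.append(m + left + str(i) + right + m + '   ')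
--         rows.append(''.join(segs))
--     return '\n'.join(rows)
-- ===== Notes on version B (the rewrite author's own statement) =====
-- stated objective: alternative
-- what changed: Replaces A's single cell-major loop growing three accumulator strings with per-cell visibility tests and a three-way nested digit branch by: a closed-form clamp computing the visible number range up front, a row-major outer loop over the five row kinds building each output row whole, string repetition for the uniform rows, and two independent gap conditions for the middle row.
import Mathlib
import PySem

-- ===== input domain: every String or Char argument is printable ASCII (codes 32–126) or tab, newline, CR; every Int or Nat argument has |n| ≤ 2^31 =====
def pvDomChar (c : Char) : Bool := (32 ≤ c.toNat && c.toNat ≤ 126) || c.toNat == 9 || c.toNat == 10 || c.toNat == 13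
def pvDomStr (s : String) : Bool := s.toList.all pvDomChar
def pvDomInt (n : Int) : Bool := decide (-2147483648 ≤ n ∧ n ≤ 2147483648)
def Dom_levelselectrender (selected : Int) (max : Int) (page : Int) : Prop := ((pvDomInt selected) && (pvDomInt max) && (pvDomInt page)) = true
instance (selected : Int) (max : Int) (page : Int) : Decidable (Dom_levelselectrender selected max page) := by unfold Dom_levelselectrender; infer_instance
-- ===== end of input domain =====

-- B renders row-major: the visible count is a closed-form clamp (no per-cell test),
-- each of the five rows is built whole from a row-kind code, with repetition for the
-- uniform rows and two independent gap conditions for the middle row; same output, same cost.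


-- ===== PORT A =====
-- the body of A's 'for i1 in [1,2,3,4,5]' loop, on the state (topbot, midpad, mid)
def pvBodyA (selected max page : Int) (st : String × String × String) (i1 : Int) :
    String × String × String :=
  let i := i1 + 5 * page
  if i ≤ max then
    let topbot := if i = selected then st.1 ++ "# # # # #   " else st.1 ++ "- - - - -   "
    let midpad := if i = selected then st.2.1 ++ "#       #   " else st.2.1 ++ "-       -   "
    let mid :=
      if i > 99 then
        (if i = selected then st.2.2 ++ "#  " ++ PySem.Int.toStr i ++ "  #   "
         else st.2.2 ++ "-  " ++ PySem.Int.toStr i ++ "  -   ")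
      else if i > 9 then
        (if i = selected then st.2.2 ++ "#   " ++ PySem.Int.toStr i ++ "  #   "
         else st.2.2 ++ "-   " ++ PySem.Int.toStr i ++ "  -   ")
      else
        (if i = selected then st.2.2 ++ "#   " ++ PySem.Int.toStr i ++ "   #   "
         else st.2.2 ++ "-   " ++ PySem.Int.toStr i ++ "   -   ")
    (topbot, midpad, mid)
  else st

def levelselectrender (selected : Int) (max : Int) (page : Int) : String :=
  let r := [(1 : Int), 2, 3, 4, 5].foldl (pvBodyA selected max page) ("", "", "")
  r.1 ++ "\n" ++ r.2.1 ++ "\n" ++ r.2.2 ++ "\n" ++ r.2.1 ++ "\n" ++ r.1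

-- ===== PORT B =====
-- hand port of Python string repetition s * n (exact: concatenation of n copies)
def pvRepeatStr (s : String) (n : Nat) : String := String.join (List.replicate n s)

-- the segment that B appends to the row of the given kind for number i
def pvSegB (selected : Int) (kind : Nat) (i : Int) : String :=
  let m : String := if i = selected then "#" else "-"
  if kind = 0 then pvRepeatStr (m ++ " ") 4 ++ (m ++ "   ")
  else if kind = 1 then m ++ pvRepeatStr " " 7 ++ m ++ "   "
  else
    let left := if i > 99 then "  " else "   "
    let right := if i > 9 then "  " else "   "
    m ++ left ++ PySem.Int.toStr i ++ right ++ m ++ "   "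

def levelselectrender_alt (selected : Int) (max : Int) (page : Int) : String :=
  let count0 := min (5 : Int) (max - 5 * page)
  let count := if count0 < 0 then 0 else count0
  let nums := PySem.List.pyRange (5 * page + 1) (5 * page + 1 + count) 1
  let rows := ([0, 1, 2, 1, 0] : List Nat).map
    (fun kind => PySem.Str.join "" (nums.map (pvSegB selected kind)))
  PySem.Str.join "\n" rows

-- ===== PRECONDITION & SPEC =====
def Spec_levelselectrender (selected : Int) (max : Int) (page : Int) (out : String) : Prop := out = levelselectrender_alt selected max page
instance (selected : Int) (max : Int) (page : Int) (out : String) : Decidable (Spec_levelselectrender selected max page out) := by unfold Spec_levelselectrender; infer_instance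

-- ===== CLAIM =====
def Claim_equal_levelselectrender : Prop := ∀ (selected : Int) (max : Int) (page : Int), Dom_levelselectrender selected max page → Spec_levelselectrender selected max page (levelselectrender selected max page)

-- ===== LEMMAS AND PROOFS =====

theorem pvStrExt (a b : String) (h : a.toList = b.toList) : a = b := by
  have := congrArg String.ofList h; simpa using this

theorem pvJoinEmptyCons (x : String) (xs : List String) :
    PySem.Str.join "" (x :: xs) = x ++ PySem.Str.join "" xs := by
  apply pvStrExt
  have hic : ∀ (a : List Char) (t : List (List Char)),
      List.intercalate [] (a :: t) = a ++ List.intercalate [] t := by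
    intro a t
    cases t with
    | nil => simp [List.intercalate]
    | cons b t => simp [List.intercalate, List.intersperse]
  simp [PySem.Str.join, PySem.Chars.join, hic, String.toList_append]

theorem pvJoinFive (a b c d e : String) :
    PySem.Str.join "\n" [a, b, c, d, e] =
      a ++ "\n" ++ b ++ "\n" ++ c ++ "\n" ++ d ++ "\n" ++ e := by
  apply pvStrExt
  simp [PySem.Str.join, PySem.Chars.join, List.intercalate, List.intersperse,
    String.toList_append]

theorem pvProdExt (a d : String) (b e : String) (c f : String)
    (h1 : a = d) (h2 : b = e) (h3 : c = f) : ((a, b, c) : String × String × String) = (d, e, f) := by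
  subst h1 h2 h3; rfl

theorem pvBodyA_eq_seg (selected max page : Int) (st : String × String × String) (i1 : Int) :
    pvBodyA selected max page st i1 =
      if i1 + 5 * page ≤ max then
        (st.1 ++ pvSegB selected 0 (i1 + 5 * page),
         st.2.1 ++ pvSegB selected 1 (i1 + 5 * page),
         st.2.2 ++ pvSegB selected 2 (i1 + 5 * page))
      else st := by
  by_cases h1 : i1 + 5 * page ≤ max <;>
    by_cases h2 : i1 + 5 * page = selected <;>
      by_cases h3 : i1 + 5 * page > 99 <;>
        by_cases h4 : i1 + 5 * page > 9 <;>
          (simp only [pvBodyA, pvSegB, pvRepeatStr, h1, h3, h4, ite_true, ite_false] <;>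
           simp only [h2, ite_true, ite_false] <;>
            first
              | rfl
              | (exact absurd h4 (by omega))
              | (refine pvProdExt _ _ _ _ _ _ ?_ ?_ ?_ <;>
                  first
                    | (exact absurd h4 (by omega))
                    | (apply pvStrExt;
                       simp [List.replicate, String.join, String.toList_append])))

theorem pvFoldA (selected max page : Int) (l : List Int) (t p m : String) :
    l.foldl (pvBodyA selected max page) (t, p, m) =
      (t ++ PySem.Str.join "" ((l.filter (fun i1 => decide (i1 + 5 * page ≤ max))).map
              (fun i1 => pvSegB selected 0 (i1 + 5 * page))),
       p ++ PySem.Str.join "" ((l.filter (fun i1 => decide (i1 + 5 * page ≤ max))).map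
              (fun i1 => pvSegB selected 1 (i1 + 5 * page))),
       m ++ PySem.Str.join "" ((l.filter (fun i1 => decide (i1 + 5 * page ≤ max))).map
              (fun i1 => pvSegB selected 2 (i1 + 5 * page)))) := by
  induction l generalizing t p m with
  | nil =>
      show (t, p, m) = _
      simp [PySem.Str.join, PySem.Chars.join, List.intercalate]
  | cons x xs ih =>
      by_cases h : x + 5 * page ≤ max
      · simp only [List.foldl_cons, pvBodyA_eq_seg, if_pos h, List.filter_cons, decide_eq_true h,
          if_pos, List.map_cons, pvJoinEmptyCons, ih]
        simp [String.append_assoc]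
      · simp only [List.foldl_cons, pvBodyA_eq_seg, if_neg h, List.filter_cons,
          decide_eq_false h, ih]
        simp

-- evaluate B's pyRange for a concrete count
theorem pvRangeEval (a c : Int) (_hc : 0 ≤ c) :
    PySem.List.pyRange a (a + c) 1 = (List.range c.toNat).map (fun k => a + (k : Int)) := by
  rw [PySem.List.pyRange_one]
  have h2 : a + c - a = c := by ring
  rw [h2]
  generalize List.range c.toNat = l
  induction l with
  | nil => rfl
  | cons x xs ih =>
      show _ = List.map (fun k => a + k) (Int.ofNat x :: (do let a ← xs; pure (↑a : Int)))
      simp only [List.map_cons, ih]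
      rfl

-- B's visible-number range equals A's filtered-and-shifted index list
theorem pvNumsEq (max page : Int) :
    PySem.List.pyRange (5 * page + 1)
        (5 * page + 1 +
          (if min (5 : Int) (max - 5 * page) < 0 then 0 else min (5 : Int) (max - 5 * page))) 1 =
      (([(1 : Int), 2, 3, 4, 5].filter (fun i1 => decide (i1 + 5 * page ≤ max))).map
        (fun i1 => i1 + 5 * page)) := by
  have hd : max - 5 * page ≤ 0 ∨ max - 5 * page = 1 ∨ max - 5 * page = 2 ∨
      max - 5 * page = 3 ∨ max - 5 * page = 4 ∨ 5 ≤ max - 5 * page := by omega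
  rcases hd with h | h | h | h | h | h
  · have hm : (if min (5 : Int) (max - 5 * page) < 0 then 0 else min (5 : Int) (max - 5 * page)) = (0 : Int) := by
      split_ifs <;> omega
    rw [hm, pvRangeEval _ _ (by omega)]
    have c1 : decide ((1:Int) + 5 * page ≤ max) = false := decide_eq_false (by omega)
    have c2 : decide ((2:Int) + 5 * page ≤ max) = false := decide_eq_false (by omega)
    have c3 : decide ((3:Int) + 5 * page ≤ max) = false := decide_eq_false (by omega)
    have c4 : decide ((4:Int) + 5 * page ≤ max) = false := decide_eq_false (by omega)
    have c5 : decide ((5:Int) + 5 * page ≤ max) = false := decide_eq_false (by omega)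
    simp only [List.filter_cons, List.filter_nil, c1, c2, c3, c4, c5, if_true, if_false,
      Bool.false_eq_true, List.map_cons, List.map_nil]
    simp [List.range_succ, List.cons.injEq]
    try omega
  · have hm : (if min (5 : Int) (max - 5 * page) < 0 then 0 else min (5 : Int) (max - 5 * page)) = (1 : Int) := by
      split_ifs <;> omega
    rw [hm, pvRangeEval _ _ (by omega)]
    have c1 : decide ((1:Int) + 5 * page ≤ max) = true := decide_eq_true (by omega)
    have c2 : decide ((2:Int) + 5 * page ≤ max) = false := decide_eq_false (by omega)
    have c3 : decide ((3:Int) + 5 * page ≤ max) = false := decide_eq_false (by omega)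
    have c4 : decide ((4:Int) + 5 * page ≤ max) = false := decide_eq_false (by omega)
    have c5 : decide ((5:Int) + 5 * page ≤ max) = false := decide_eq_false (by omega)
    simp only [List.filter_cons, List.filter_nil, c1, c2, c3, c4, c5, if_true, if_false,
      Bool.false_eq_true, List.map_cons, List.map_nil]
    simp [List.range_succ, List.cons.injEq]
    try omega
  · have hm : (if min (5 : Int) (max - 5 * page) < 0 then 0 else min (5 : Int) (max - 5 * page)) = (2 : Int) := by
      split_ifs <;> omega
    rw [hm, pvRangeEval _ _ (by omega)]
    have c1 : decide ((1:Int) + 5 * page ≤ max) = true := decide_eq_true (by omega)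
    have c2 : decide ((2:Int) + 5 * page ≤ max) = true := decide_eq_true (by omega)
    have c3 : decide ((3:Int) + 5 * page ≤ max) = false := decide_eq_false (by omega)
    have c4 : decide ((4:Int) + 5 * page ≤ max) = false := decide_eq_false (by omega)
    have c5 : decide ((5:Int) + 5 * page ≤ max) = false := decide_eq_false (by omega)
    simp only [List.filter_cons, List.filter_nil, c1, c2, c3, c4, c5, if_true, if_false,
      Bool.false_eq_true, List.map_cons, List.map_nil]
    simp [List.range_succ, List.cons.injEq]
    omega
  · have hm : (if min (5 : Int) (max - 5 * page) < 0 then 0 else min (5 : Int) (max - 5 * page)) = (3 : Int) := by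
      split_ifs <;> omega
    rw [hm, pvRangeEval _ _ (by omega)]
    have c1 : decide ((1:Int) + 5 * page ≤ max) = true := decide_eq_true (by omega)
    have c2 : decide ((2:Int) + 5 * page ≤ max) = true := decide_eq_true (by omega)
    have c3 : decide ((3:Int) + 5 * page ≤ max) = true := decide_eq_true (by omega)
    have c4 : decide ((4:Int) + 5 * page ≤ max) = false := decide_eq_false (by omega)
    have c5 : decide ((5:Int) + 5 * page ≤ max) = false := decide_eq_false (by omega)
    simp only [List.filter_cons, List.filter_nil, c1, c2, c3, c4, c5, if_true, if_false,
      Bool.false_eq_true, List.map_cons, List.map_nil]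
    simp [List.range_succ, List.cons.injEq]
    omega
  · have hm : (if min (5 : Int) (max - 5 * page) < 0 then 0 else min (5 : Int) (max - 5 * page)) = (4 : Int) := by
      split_ifs <;> omega
    rw [hm, pvRangeEval _ _ (by omega)]
    have c1 : decide ((1:Int) + 5 * page ≤ max) = true := decide_eq_true (by omega)
    have c2 : decide ((2:Int) + 5 * page ≤ max) = true := decide_eq_true (by omega)
    have c3 : decide ((3:Int) + 5 * page ≤ max) = true := decide_eq_true (by omega)
    have c4 : decide ((4:Int) + 5 * page ≤ max) = true := decide_eq_true (by omega)
    have c5 : decide ((5:Int) + 5 * page ≤ max) = false := decide_eq_false (by omega)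
    simp only [List.filter_cons, List.filter_nil, c1, c2, c3, c4, c5, if_true, if_false,
      Bool.false_eq_true, List.map_cons, List.map_nil]
    simp [List.range_succ, List.cons.injEq]
    omega
  · have hm : (if min (5 : Int) (max - 5 * page) < 0 then 0 else min (5 : Int) (max - 5 * page)) = (5 : Int) := by
      split_ifs <;> omega
    rw [hm, pvRangeEval _ _ (by omega)]
    have c1 : decide ((1:Int) + 5 * page ≤ max) = true := decide_eq_true (by omega)
    have c2 : decide ((2:Int) + 5 * page ≤ max) = true := decide_eq_true (by omega)
    have c3 : decide ((3:Int) + 5 * page ≤ max) = true := decide_eq_true (by omega)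
    have c4 : decide ((4:Int) + 5 * page ≤ max) = true := decide_eq_true (by omega)
    have c5 : decide ((5:Int) + 5 * page ≤ max) = true := decide_eq_true (by omega)
    simp only [List.filter_cons, List.filter_nil, c1, c2, c3, c4, c5, if_true, if_false,
      Bool.false_eq_true, List.map_cons, List.map_nil]
    simp [List.range_succ, List.cons.injEq]
    omega

-- ===== VERDICT =====
theorem levelselectrender_spec : Claim_equal_levelselectrender := by
  intro selected max page _
  unfold Spec_levelselectrender levelselectrender levelselectrender_alt
  simp only [pvFoldA]
  simp only [pvNumsEq]
  simp only [List.map_cons, List.map_nil, List.map_map, Function.comp_def]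
  rw [pvJoinFive]
  simp
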